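-- pv_equiv track=rewrite | github.com/teichbauer/p3sat3 | basics.py | fill_2set
-- ===== SOURCE A (Python) =====
-- def fill_2set(src, lst2):  # Complexity: O(m**2)
--     ''' used in get_setlst, for case order==2
--         src is a mutable list. should be a copy, to prevent side-effect
--         '''
--     if len(src) < 2:
--         return lst2
--     k1 = src.pop(0)
--     for k in src:
--         kpair = [k1, k]
--         kset = set(kpair)
--         if kset not in lst2:
--             lst2.append(kset)
--     return fill_2set(src, lst2)
-- ===== SOURCE B (Python) =====
-- def fill_2set(src, lst2):
--     """Collect the distinct 2-element subsets of src into lst2 (in first-appearance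
--     order of the index pairs), via an index-pair scan with a hash-set dedup instead
--     of A's recursion + pop(0) + linear 'not in lst2' scan.
--     Same return value and same mutation of lst2; unlike A, src is not drained."""
--     seen = {frozenset(e) for e in lst2}
--     for i, k1 in enumerate(src):
--         for k in src[i + 1:]:
--             fs = frozenset((k1, k))
--             if fs not in seen:
--                 seen.add(fs)
--                 lst2.append(set(fs))
--     return lst2
-- ===== Notes on version B (the rewrite author's own statement) =====
-- stated objective: faster
-- what changed: Replaces A's recursion with pop(0) and a linear 'kset not in lst2' scan over the growing result by a single enumerate/slice index-pair scan that dedups through a hash set of frozensets (seeded from lst2) and leaves src unmutated.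
import Mathlib
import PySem

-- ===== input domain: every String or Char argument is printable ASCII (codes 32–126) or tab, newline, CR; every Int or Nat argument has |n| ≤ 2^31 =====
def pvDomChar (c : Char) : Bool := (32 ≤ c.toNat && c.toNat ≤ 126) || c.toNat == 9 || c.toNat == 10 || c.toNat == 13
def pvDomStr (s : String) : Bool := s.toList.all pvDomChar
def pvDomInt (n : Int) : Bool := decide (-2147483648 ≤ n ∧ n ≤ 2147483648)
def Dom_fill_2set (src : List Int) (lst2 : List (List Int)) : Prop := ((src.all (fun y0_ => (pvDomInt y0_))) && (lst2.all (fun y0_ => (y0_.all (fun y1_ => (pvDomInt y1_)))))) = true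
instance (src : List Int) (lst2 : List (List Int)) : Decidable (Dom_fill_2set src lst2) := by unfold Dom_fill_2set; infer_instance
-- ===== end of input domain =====

-- B replaces A's recursion + pop(0) + linear 'not in lst2' scan by an index-pair scan with a
-- hash-set dedup (objective: faster). Equal return value and lst2 mutation; A additionally
-- drains src down to its last element, a side effect B does not reproduce (return value proved).


-- ===== PORT A =====
-- the 'for k in src' body after k1 = src.pop(0); each inner list is a Python set (PySem.Set Int),
-- 'kset not in lst2' is membership under Python set equality (PySem.Set.equal)
def fillInner (k1 : Int) (rest : List Int) (lst2 : List (List Int)) : List (List Int) :=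
  rest.foldl (fun acc k =>
    let kset := PySem.Set.ofList [k1, k]
    if acc.any (fun e => PySem.Set.equal kset e) then acc else acc ++ [kset]) lst2

def fill_2set : List Int → List (List Int) → List (List Int)
  | [], lst2 => lst2
  | [_], lst2 => lst2
  | k1 :: k2 :: rest, lst2 => fill_2set (k2 :: rest) (fillInner k1 (k2 :: rest) lst2)

-- ===== PORT B =====
-- state = (seen, out): 'seen' models the Python set of frozensets as the list of its element
-- lists — only membership under frozenset equality (PySem.Set.equal) is ever used, so the
-- deduplication and hash order of the Python set are value-irrelevant; 'seen.add(fs)' appends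
-- (fs was just tested absent), 'lst2.append(set(fs))' appends the same elements.
def altStep (st : List (List Int) × List (List Int)) (k1 k : Int) :
    List (List Int) × List (List Int) :=
  let fs := PySem.Set.ofList [k1, k]
  if st.1.any (fun e => PySem.Set.equal fs e) then st
  else (st.1 ++ [fs], st.2 ++ [fs])

def fill_2set_alt (src : List Int) (lst2 : List (List Int)) : List (List Int) :=
  ((PySem.List.enumerate src).foldl
    (fun st p =>
      (PySem.List.slice src (some (p.1 + 1)) none).foldl
        (fun st k => altStep st p.2 k) st)
    (lst2, lst2)).2

-- ===== PRECONDITION & SPEC =====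
def Spec_fill_2set (src : List Int) (lst2 : List (List Int)) (out : List (List Int)) : Prop := out = fill_2set_alt src lst2
instance (src : List Int) (lst2 : List (List Int)) (out : List (List Int)) : Decidable (Spec_fill_2set src lst2 out) := by unfold Spec_fill_2set; infer_instance

-- ===== CLAIM (what is proved, stated in full; the proofs are below) =====
def Claim_equal_fill_2set : Prop := ∀ (src : List Int) (lst2 : List (List Int)), Dom_fill_2set src lst2 → Spec_fill_2set src lst2 (fill_2set src lst2)

-- ===== LEMMAS AND PROOFS =====
-- B's inner loop keeps its pair state diagonal and each component is A's inner loop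
lemma inner_diag (k1 : Int) (ks : List Int) (L : List (List Int)) :
    List.foldl (fun st k => altStep st k1 k) (L, L) ks
      = (fillInner k1 ks L, fillInner k1 ks L) := by
  induction ks generalizing L with
  | nil => simp [fillInner]
  | cons k t ih =>
      simp only [List.foldl_cons, fillInner, altStep]
      by_cases h : L.any (fun e => PySem.Set.equal (PySem.Set.ofList [k1, k]) e)
      · simpa [h, fillInner] using ih L
      · simpa [h, fillInner] using ih (L ++ [PySem.Set.ofList [k1, k]])

-- A's recursion step, valid also when the tail is empty or a singleton
lemma fill_2set_cons (k1 : Int) (rest : List Int) (L : List (List Int)) :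
    fill_2set (k1 :: rest) L = fill_2set rest (fillInner k1 rest L) := by
  cases rest with
  | nil => simp [fill_2set, fillInner]
  | cons k2 t => rfl

-- B's outer loop over an enumerated suffix of src computes A's recursion on that suffix
lemma outer_eq (xs : List Int) : ∀ (pre : List Int) (L : List (List Int)),
    (PySem.List.enumerate xs (pre.length : Int)).foldl
      (fun st p =>
        (PySem.List.slice (pre ++ xs) (some (p.1 + 1)) none).foldl
          (fun st k => altStep st p.2 k) st)
      (L, L)
    = (fill_2set xs L, fill_2set xs L) := by
  induction xs with
  | nil => intro pre L; simp [PySem.List.enumerate, fill_2set]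
  | cons k1 rest ih =>
      intro pre L
      rw [PySem.List.enumerate_cons, List.foldl_cons]
      have hslice : PySem.List.slice (pre ++ k1 :: rest) (some ((pre.length : Int) + 1)) none
          = rest := by
        have : ((pre.length : Int) + 1) = ((pre.length + 1 : Nat) : Int) := by push_cast; ring
        rw [this, PySem.List.slice_from_natCast]
        rw [show pre ++ k1 :: rest = (pre ++ [k1]) ++ rest by simp]
        rw [show pre.length + 1 = (pre ++ [k1]).length by simp]
        exact List.drop_left
      rw [hslice, inner_diag]
      have hpre : (pre.length : Int) + 1 = ((pre ++ [k1]).length : Int) := by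
        simp
      have hbase : pre ++ k1 :: rest = (pre ++ [k1]) ++ rest := by simp
      rw [hpre, hbase, ih (pre ++ [k1]) (fillInner k1 rest L), fill_2set_cons]

-- ===== VERDICT (by name: the statement is the Claim_ definition above) =====
theorem fill_2set_spec : Claim_equal_fill_2set := by
  intro src lst2 _
  unfold Spec_fill_2set fill_2set_alt
  have h := outer_eq src [] lst2
  simp only [List.nil_append, List.length_nil, Nat.cast_zero] at h
  rw [h]
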